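-- pv_equiv track=rewrite | github.com/wzygxr/shuati | class025_BinarySearch/Code01_FindNumber.py | cut_trees
-- ===== SOURCE A (Python) =====
-- from typing import List
--
-- def cut_trees(trees: List[int], m: int) -> int:
--     if not trees:
--         return 0
--
--     # 找到最高的树，作为二分查找的右边界
--     max_height = max(trees)
--
--     l, r = 0, max_height
--     ans = 0
--     while l <= r:
--         mid = l + ((r - l) >> 1)
--         wood = 0
--         # 计算砍伐后能获得的木材量
--         for tree in trees:
--             if tree > mid:
--                 wood += tree - mid
--
--         if wood >= m:
--             ans = mid
--             l = mid + 1
--         else: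
--             r = mid - 1
--     return ans
-- ===== SOURCE B (Python) =====
-- from typing import List
--
-- def cut_trees(trees: List[int], m: int) -> int:
--     # Sort once + prefix sums; each wood evaluation is a hand-rolled bisect
--     # plus a closed formula instead of a scan over the whole list.
--     if not trees:
--         return 0
--     s = sorted(trees)
--     n = len(s)
--     pref = [0]
--     t = 0
--     for x in s:
--         t += x
--         pref.append(t)
--
--     def wood_at(mid: int) -> int:
--         # k = number of elements <= mid (bisect_right)
--         lo, hi = 0, n
--         while lo < hi:
--             h = (lo + hi) // 2
--             if s[h] <= mid:
--                 lo = h + 1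
--             else:
--                 hi = h
--         k = lo
--         return (pref[n] - pref[k]) - (n - k) * mid
--
--     l, r = 0, s[-1]
--     ans = 0
--     while l <= r:
--         mid = (l + r) // 2
--         if wood_at(mid) >= m:
--             ans = mid
--             l = mid + 1
--         else:
--             r = mid - 1
--     return ans
-- ===== Notes on version B (the rewrite author's own statement) =====
-- stated objective: alternative
-- what changed: B sorts the trees once and builds prefix sums, so each wood evaluation inside the binary search on the answer is a bisect plus a closed formula instead of A's full scan over the list.
import Mathlib
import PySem

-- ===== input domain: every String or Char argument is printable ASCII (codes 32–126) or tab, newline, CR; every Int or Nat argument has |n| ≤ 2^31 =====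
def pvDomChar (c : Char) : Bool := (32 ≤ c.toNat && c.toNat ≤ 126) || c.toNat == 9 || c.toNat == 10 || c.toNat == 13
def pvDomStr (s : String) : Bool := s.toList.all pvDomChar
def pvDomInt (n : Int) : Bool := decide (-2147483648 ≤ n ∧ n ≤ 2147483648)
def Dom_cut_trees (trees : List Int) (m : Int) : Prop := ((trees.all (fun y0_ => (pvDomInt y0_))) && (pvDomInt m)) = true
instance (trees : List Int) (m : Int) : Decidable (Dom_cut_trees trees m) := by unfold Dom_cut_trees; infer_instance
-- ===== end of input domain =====

-- B sorts once and uses prefix sums + a bisect per wood evaluation instead of A's scan over the whole list per midpoint (alternative algorithm).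

-- ===== PORT A =====
-- the while-loop of A: l, r, ans state; wood recomputed by a full scan each round
def cutLoopA (trees : List Int) (m l r ans : Int) : Int :=
  if h : l ≤ r then
    let mid := l + PySem.Int.floordiv (r - l) 2
    let wood := trees.foldl (fun w tree => if tree > mid then w + (tree - mid) else w) 0
    if wood ≥ m then cutLoopA trees m (mid + 1) r mid
    else cutLoopA trees m l (mid - 1) ans
  else ans
termination_by (r + 1 - l).toNat
decreasing_by
  · have h0 : (0:Int) ≤ PySem.Int.floordiv (r - l) 2 :=
      (PySem.Int.le_floordiv_iff_mul_le (by omega)).2 (by omega)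
    omega
  · have h1 : PySem.Int.floordiv (r - l) 2 < (r - l) + 1 :=
      (PySem.Int.floordiv_lt_iff_lt_mul (by omega)).2 (by omega)
    omega

def cut_trees (trees : List Int) (m : Int) : Int :=
  if trees = [] then 0
  else
    -- max(trees); trees ≠ [] so max? is some and the default is unreachable
    let maxHeight := (PySem.List.max? trees (fun x => x)).getD 0
    cutLoopA trees m 0 maxHeight 0

-- ===== PORT B =====
-- hand-written bisect_right of Source B: first index whose element exceeds mid
def bisLoop (s : List Int) (mid lo hi : Int) : Int :=
  if h : lo < hi then
    let hm := PySem.Int.floordiv (lo + hi) 2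
    if PySem.List.pyGetD s hm 0 ≤ mid then bisLoop s mid (hm + 1) hi
    else bisLoop s mid lo hm
  else lo
termination_by (hi - lo).toNat
decreasing_by
  · have hb := PySem.Int.floordiv_two_mid_bounds (le_of_lt h)
    have h1 : PySem.Int.floordiv (lo + hi) 2 < hi :=
      (PySem.Int.floordiv_lt_iff_lt_mul (by omega)).2 (by omega)
    omega
  · have h1 : PySem.Int.floordiv (lo + hi) 2 < hi :=
      (PySem.Int.floordiv_lt_iff_lt_mul (by omega)).2 (by omega)
    omega

-- the pref-building loop of Source B (running total, appended per element)
def buildPref (s : List Int) : List Int :=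
  (s.foldl (fun st x => (st.1 ++ [st.2 + x], st.2 + x)) ([(0:Int)], (0:Int))).1

-- wood_at of Source B: suffix sum via prefix sums minus count*mid
def woodAt (s pref : List Int) (n mid : Int) : Int :=
  let k := bisLoop s mid 0 n
  (PySem.List.pyGetD pref n 0 - PySem.List.pyGetD pref k 0) - (n - k) * mid

def cutLoopB (s pref : List Int) (n m l r ans : Int) : Int :=
  if h : l ≤ r then
    let mid := PySem.Int.floordiv (l + r) 2
    if woodAt s pref n mid ≥ m then cutLoopB s pref n m (mid + 1) r mid
    else cutLoopB s pref n m l (mid - 1) ans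
  else ans
termination_by (r + 1 - l).toNat
decreasing_by
  · have hb := PySem.Int.floordiv_two_mid_bounds h
    omega
  · have hb := PySem.Int.floordiv_two_mid_bounds h
    omega

def cut_trees_alt (trees : List Int) (m : Int) : Int :=
  if trees = [] then 0
  else
    let s := PySem.List.sorted trees (fun x => x)
    let n := PySem.List.len s
    let pref := buildPref s
    cutLoopB s pref n m 0 (PySem.List.pyGetD s (-1) 0) 0

-- ===== PRECONDITION & SPEC =====
def Spec_cut_trees (trees : List Int) (m : Int) (out : Int) : Prop := out = cut_trees_alt trees m
instance (trees : List Int) (m : Int) (out : Int) : Decidable (Spec_cut_trees trees m out) := by unfold Spec_cut_trees; infer_instance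

-- ===== CLAIM (what is proved, stated in full; the proofs are below) =====
def Claim_equal_cut_trees : Prop := ∀ (trees : List Int) (m : Int), Dom_cut_trees trees m → Spec_cut_trees trees m (cut_trees trees m)

-- ===== LEMMAS AND PROOFS =====

-- A's inner scan is the sum of the clipped differences
lemma woodA_eq_sum (trees : List Int) (mid : Int) :
    trees.foldl (fun w tree => if tree > mid then w + (tree - mid) else w) 0
      = (trees.map (fun t => if mid < t then t - mid else 0)).sum := by
  have hf : (fun (w tree : Int) => if tree > mid then w + (tree - mid) else w)
      = fun w tree => w + (if mid < tree then tree - mid else 0) := by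
    funext w t; by_cases h : mid < t <;> simp [h, gt_iff_lt]
  rw [hf, PySem.List.foldl_add, zero_add]

-- the pref loop computes all prefix sums
lemma foldPref (s : List Int) (p : List Int) (t : Int) :
    s.foldl (fun st x => (st.1 ++ [st.2 + x], st.2 + x)) (p, t)
      = (p ++ (List.range s.length).map (fun i => t + (s.take (i+1)).sum), t + s.sum) := by
  induction s generalizing p t with
  | nil => simp
  | cons x s ih =>
    simp only [List.foldl_cons]
    rw [ih]
    refine Prod.ext ?_ (by simp; ring)
    simp only [List.length_cons, List.range_succ_eq_map, List.map_cons, List.map_map]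
    simp only [List.append_assoc, List.cons_append, List.nil_append]
    congr 1
    simp only [List.take_succ_cons, List.sum_cons]
    congr 1
    · simp
    · apply List.map_congr_left
      intro i _
      simp only [Function.comp]
      ring


lemma buildPref_length (s : List Int) : (buildPref s).length = s.length + 1 := by
  unfold buildPref; rw [foldPref]; simp

lemma buildPref_getD (s : List Int) (k : Nat) (hk : k ≤ s.length) :
    (buildPref s).getD k 0 = (s.take k).sum := by
  unfold buildPref; rw [foldPref]
  cases k with
  | zero => simp
  | succ j =>
    have hj : j < s.length := by omega
    simp [List.getD_eq_getElem?_getD, List.getElem?_range hj]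


-- bisect loop invariant: it returns the count of elements ≤ mid
lemma bisLoop_spec (s : List Int) (hs : s.Pairwise (fun a b => a ≤ b)) (mid : Int) :
    ∀ d : Nat, ∀ lo hi : Int, (hi - lo).toNat ≤ d → 0 ≤ lo → lo ≤ hi → hi ≤ s.length →
    (∀ j : Nat, j < lo.toNat → ∀ hj : j < s.length, s[j] ≤ mid) →
    (∀ j : Nat, hi.toNat ≤ j → ∀ hj : j < s.length, mid < s[j]) →
    lo ≤ bisLoop s mid lo hi ∧ bisLoop s mid lo hi ≤ hi ∧
    (∀ j : Nat, (hj : j < s.length) →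
      (j < (bisLoop s mid lo hi).toNat → s[j] ≤ mid) ∧
      ((bisLoop s mid lo hi).toNat ≤ j → mid < s[j])) := by
  have hmono : ∀ (i j : Nat) (hi' : i < s.length) (hj' : j < s.length), i ≤ j → s[i] ≤ s[j] := by
    intro i j hi' hj' hij
    rcases Nat.lt_or_ge i j with h | h
    · exact (List.pairwise_iff_getElem.1 hs) i j hi' hj' h
    · have : i = j := by omega
      subst this; exact le_refl _
  intro d
  induction d with
  | zero =>
    intro lo hi hd h0 hlh hhn hlow hhigh
    have heq : lo = hi := by omega
    rw [bisLoop, dif_neg (by omega)]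
    refine ⟨le_refl _, le_of_eq heq, ?_⟩
    intro j hj
    exact ⟨fun hjk => hlow j hjk hj, fun hjk => hhigh j (by omega) hj⟩
  | succ d ih =>
    intro lo hi hd h0 hlh hhn hlow hhigh
    by_cases hlt : lo < hi
    · rw [bisLoop]
      simp only [dif_pos hlt]
      have hb := PySem.Int.floordiv_two_mid_bounds (le_of_lt hlt)
      have hmlt : PySem.Int.floordiv (lo + hi) 2 < hi :=
        (PySem.Int.floordiv_lt_iff_lt_mul (by omega)).2 (by omega)
      have hmn : PySem.Int.floordiv (lo + hi) 2 < (s.length : Int) := by omega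
      have hmn' : (PySem.Int.floordiv (lo + hi) 2).toNat < s.length := by omega
      rw [PySem.List.pyGetD_eq_getElem s 0 (by omega) hmn]
      by_cases hc : s[(PySem.Int.floordiv (lo + hi) 2).toNat] ≤ mid
      · rw [if_pos hc]
        have res := ih (PySem.Int.floordiv (lo + hi) 2 + 1) hi (by omega) (by omega) (by omega) hhn
          (fun j hjk hj => le_trans (hmono j (PySem.Int.floordiv (lo + hi) 2).toNat hj hmn' (by omega)) hc) hhigh
        exact ⟨le_trans (by omega) res.1, res.2.1, res.2.2⟩
      · rw [if_neg hc]
        have hcm : mid < s[(PySem.Int.floordiv (lo + hi) 2).toNat] := by omega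
        have res := ih lo (PySem.Int.floordiv (lo + hi) 2) (by omega) h0 (by omega) (by omega) hlow
          (fun j hjk hj => lt_of_lt_of_le hcm (hmono (PySem.Int.floordiv (lo + hi) 2).toNat j hmn' hj (by omega)))
        exact ⟨res.1, by omega, res.2.2⟩
    · rw [bisLoop, dif_neg hlt]
      have heq : lo = hi := by omega
      refine ⟨le_refl _, le_of_eq heq, ?_⟩
      intro j hj
      exact ⟨fun hjk => hlow j hjk hj, fun hjk => hhigh j (by omega) hj⟩


lemma sum_map_clip_all_le (l : List Int) (mid : Int) (h : ∀ x ∈ l, x ≤ mid) :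
    (l.map (fun t => if mid < t then t - mid else 0)).sum = 0 := by
  apply List.sum_eq_zero
  intro x hx
  rcases List.mem_map.1 hx with ⟨y, hy, rfl⟩
  simp [not_lt.2 (h y hy)]

lemma sum_map_clip_all_gt (l : List Int) (mid : Int) (h : ∀ x ∈ l, mid < x) :
    (l.map (fun t => if mid < t then t - mid else 0)).sum = l.sum - l.length * mid := by
  induction l with
  | nil => simp
  | cons x l ih =>
    have hx := h x (by simp)
    have ih' := ih (fun y hy => h y (by simp [hy]))
    simp only [List.map_cons, List.sum_cons, List.length_cons, ih', if_pos hx]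
    push_cast; ring

-- wood via prefix sums equals the clipped sum over the sorted list
lemma woodAt_eq_sum (s : List Int) (hs : s.Pairwise (fun a b => a ≤ b)) (mid : Int) :
    woodAt s (buildPref s) (PySem.List.len s) mid
      = (s.map (fun t => if mid < t then t - mid else 0)).sum := by
  simp only [woodAt, PySem.List.len_eq]
  obtain ⟨hk0, hkn, hchar⟩ := bisLoop_spec s hs mid s.length 0 s.length (by omega) (by omega)
    (by omega) (by omega) (fun j hj _ => absurd hj (by omega))
    (fun j hj hj' => absurd hj (by omega))
  set k := bisLoop s mid 0 (s.length : Int) with hk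
  have hKle : k.toNat ≤ s.length := by omega
  have hprefN : PySem.List.pyGetD (buildPref s) (s.length : Int) 0 = s.sum := by
    rw [PySem.List.pyGetD_natCast, buildPref_getD s s.length (le_refl _), List.take_length]
  have hKlt : k.toNat < (buildPref s).length := by rw [buildPref_length]; omega
  have hprefK : PySem.List.pyGetD (buildPref s) k 0 = (s.take k.toNat).sum := by
    rw [PySem.List.pyGetD_eq_getElem (buildPref s) 0 hk0 (by rw [buildPref_length]; push_cast; omega),
        ← buildPref_getD s k.toNat hKle, List.getD_eq_getElem _ _ hKlt]
  rw [hprefN, hprefK]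
  have hsplit := (List.take_append_drop k.toNat s)
  have hsum : s.sum = (s.take k.toNat).sum + (s.drop k.toNat).sum := by
    conv_lhs => rw [← hsplit]
    rw [List.sum_append]
  have hle : ∀ x ∈ s.take k.toNat, x ≤ mid := by
    intro x hx
    obtain ⟨i, hi, rfl⟩ := List.mem_iff_getElem.1 hx
    have hi2 : (i:Int) < k ∧ i < s.length := by simpa using hi
    have hi' : i < s.length := hi2.2
    rw [List.getElem_take]
    exact (hchar i hi').1 (by omega)
  have hgt : ∀ x ∈ s.drop k.toNat, mid < x := by
    intro x hx
    obtain ⟨i, hi, rfl⟩ := List.mem_iff_getElem.1 hx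
    have hi' : k.toNat + i < s.length := by simp at hi; omega
    rw [List.getElem_drop]
    exact (hchar (k.toNat + i) hi').2 (by omega)
  conv_rhs => rw [← hsplit]
  rw [List.map_append, List.sum_append, sum_map_clip_all_le _ mid hle,
      sum_map_clip_all_gt _ mid hgt, zero_add]
  have hdl : ((s.drop k.toNat).length : Int) = (s.length : Int) - k := by
    rw [List.length_drop]; omega
  rw [hdl]
  omega


lemma mid_eq (l r : Int) :
    l + PySem.Int.floordiv (r - l) 2 = PySem.Int.floordiv (l + r) 2 := by
  rw [PySem.Int.floordiv_eq_ediv_of_pos (by norm_num), PySem.Int.floordiv_eq_ediv_of_pos (by norm_num)]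
  have h : l + r = (r - l) + l * 2 := by ring
  rw [h, Int.add_mul_ediv_right _ _ (by norm_num : (2:Int) ≠ 0)]
  ring

-- the two binary-search loops agree once their wood evaluations agree
lemma loops_eq (trees s pref : List Int) (n m : Int)
    (hw : ∀ mid, woodAt s pref n mid
      = trees.foldl (fun w tree => if tree > mid then w + (tree - mid) else w) 0) :
    ∀ d : Nat, ∀ l r ans : Int, (r + 1 - l).toNat ≤ d →
    cutLoopA trees m l r ans = cutLoopB s pref n m l r ans := by
  intro d
  induction d with
  | zero =>
    intro l r ans hd
    rw [cutLoopA, cutLoopB, dif_neg (by omega), dif_neg (by omega)]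
  | succ d ih =>
    intro l r ans hd
    by_cases h : l ≤ r
    · rw [cutLoopA, cutLoopB]
      simp only [dif_pos h]
      rw [mid_eq l r, hw]
      have hb := PySem.Int.floordiv_two_mid_bounds h
      by_cases hcond : trees.foldl
          (fun w tree => if tree > PySem.Int.floordiv (l + r) 2
            then w + (tree - PySem.Int.floordiv (l + r) 2) else w) 0 ≥ m
      · rw [if_pos hcond, if_pos hcond]
        exact ih _ _ _ (by omega)
      · rw [if_neg hcond, if_neg hcond]
        exact ih _ _ _ (by omega)
    · rw [cutLoopA, cutLoopB, dif_neg h, dif_neg h]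

-- last element of a ≤-sorted nonempty list is an upper bound
lemma getLast_isMax (s : List Int) (hs : s.Pairwise (fun a b => a ≤ b)) (h : s ≠ []) :
    ∀ y ∈ s, y ≤ s.getLast h := by
  intro y hy
  obtain ⟨i, hi, rfl⟩ := List.mem_iff_getElem.1 hy
  rw [List.getLast_eq_getElem]
  rcases Nat.lt_or_ge i (s.length - 1) with hlt | hge
  · exact (List.pairwise_iff_getElem.1 hs) i (s.length - 1) hi (by omega) hlt
  · have : i = s.length - 1 := by omega
    subst this; exact le_refl _

-- ===== VERDICT (by name: the statement is the Claim_ definition above) =====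
theorem cut_trees_spec : Claim_equal_cut_trees := by
  unfold Claim_equal_cut_trees
  intro trees m _
  unfold Spec_cut_trees
  by_cases hnil : trees = []
  · subst hnil; simp [cut_trees, cut_trees_alt]
  · simp only [cut_trees, cut_trees_alt, if_neg hnil]
    have hperm := PySem.List.sorted_perm trees (fun x => x) false
    have hspw : (PySem.List.sorted trees (fun x => x)).Pairwise (fun a b => a ≤ b) := by
      simpa using PySem.List.sorted_pairwise trees (fun x => x)
    have hsne : PySem.List.sorted trees (fun x => x) ≠ [] := by
      rw [Ne, PySem.List.sorted_eq_nil_iff]; exact hnil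
    have hr : (PySem.List.max? trees (fun x => x)).getD 0
        = PySem.List.pyGetD (PySem.List.sorted trees (fun x => x)) (-1) 0 := by
      rw [PySem.List.pyGetD_neg_one _ _ hsne]
      cases hopt : PySem.List.max? trees (fun x => x) with
      | none => exact absurd ((PySem.List.max?_eq_none_iff _ _).1 hopt) hnil
      | some mx =>
        have hmem : mx ∈ trees := PySem.List.max?_mem hopt
        have hlastmem := List.getLast_mem hsne
        have h1 : (PySem.List.sorted trees (fun x => x)).getLast hsne ≤ mx := by
          have := PySem.List.max?_isMax hopt _ (hperm.mem_iff.1 hlastmem)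
          simpa using this
        have h2 : mx ≤ (PySem.List.sorted trees (fun x => x)).getLast hsne :=
          getLast_isMax _ hspw hsne mx (hperm.mem_iff.2 hmem)
        simpa using le_antisymm h2 h1
    rw [hr]
    apply loops_eq trees _ _ _ m ?_ _ 0 _ 0 (le_refl _)
    intro mid
    rw [woodAt_eq_sum _ hspw mid, woodA_eq_sum]
    exact (hperm.map _).sum_eq
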